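-- pv_equiv track=rewrite | github.com/ko-nlp/Korpora | Korpora/korpus_naverchangwon_ner.py | cleaning
-- ===== SOURCE A (Python) =====
-- from typing import List
--
-- def cleaning(raw_lines: List[str]):
--     separated_lines = [line.split('\t') for line in raw_lines]
--     all_texts, all_words, all_tags, text, words, tags, = [], [], [], "", [], []
--     for separated_line in separated_lines:
--         if len(separated_line) == 3:
--             _, word, tag = separated_line
--             text += word + " "
--             words.append(word)
--             tags.append(tag)
--         else:
--             all_texts.append(text)
--             all_words.append(words)
--             all_tags.append(tags)
--             text, words, tags = "", [], []
--     return all_texts, all_words, all_tags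
-- ===== SOURCE B (Python) =====
-- from typing import List
--
-- def cleaning(raw_lines: List[str]):
--     parts = [line.split('\t') for line in raw_lines]
--
--     # cut parts into groups at the lines that do not have exactly 3 fields;
--     # anything after the last such delimiter line is discarded
--     groups = []
--     j = 0
--     while True:
--         i = j
--         while i < len(parts) and len(parts[i]) == 3:
--             i += 1
--         if i == len(parts):
--             break
--         groups.append(parts[j:i])
--         j = i + 1
--
--     all_words = [[p[1] for p in g] for g in groups]
--     all_tags = [[p[2] for p in g] for g in groups]
--     all_texts = [''.join(w + ' ' for w in ws) for ws in all_words]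
--     return all_texts, all_words, all_tags
-- ===== Notes on version B (the rewrite author's own statement) =====
-- stated objective: alternative
-- what changed: Replaces A's single stateful pass (six parallel accumulators with flush-on-delimiter) by a recursive splitter that first cuts the split lines into groups at delimiter lines and then derives all_words/all_tags/all_texts as three maps over the group list.
import Mathlib
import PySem

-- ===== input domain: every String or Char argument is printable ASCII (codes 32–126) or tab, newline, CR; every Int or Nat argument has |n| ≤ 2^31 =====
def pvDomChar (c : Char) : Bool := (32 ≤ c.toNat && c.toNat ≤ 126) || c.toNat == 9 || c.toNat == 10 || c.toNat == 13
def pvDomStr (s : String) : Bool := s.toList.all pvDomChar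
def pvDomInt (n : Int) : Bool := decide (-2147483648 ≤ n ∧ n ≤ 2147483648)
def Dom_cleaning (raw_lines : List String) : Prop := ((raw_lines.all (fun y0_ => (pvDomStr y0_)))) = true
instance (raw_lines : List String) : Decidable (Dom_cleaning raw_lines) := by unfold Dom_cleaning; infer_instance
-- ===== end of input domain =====

-- B restructures A's stateful flush-on-delimiter pass as "split into groups, then map three extractors"; same values, no speed claim.

-- ===== PORT A =====
-- A's loop body, as a fold step over the six accumulators (all_texts, all_words, all_tags, text, words, tags)
def cleaningStepA (st : List String × List (List String) × List (List String) × String × List String × List String)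
    (p : List String) : List String × List (List String) × List (List String) × String × List String × List String :=
  match st with
  | (allT, allW, allG, t, w, g) =>
    match p with
    | [_, word, tag] => (allT, allW, allG, t ++ word ++ " ", w ++ [word], g ++ [tag])
    | _ => (allT ++ [t], allW ++ [w], allG ++ [g], "", [], [])

def cleaning (raw_lines : List String) : List String × List (List String) × List (List String) :=
  let separated_lines := raw_lines.map (fun line => (PySem.Str.split? line "\t").getD [])
  let st := separated_lines.foldl cleaningStepA ([], [], [], "", [], [])
  (st.1, st.2.1, st.2.2.1)

-- ===== PORT B =====
-- inner while loop of Source B: advance i over the leading run of 3-field lines (short-circuit 'and' as nested ifs;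
-- List.getD is exact for ps[i] because the guard ensures i < len)
def innerI (ps : List (List String)) (i : Nat) : Nat :=
  if h : i < ps.length then
    if (List.getD ps i []).length == 3 then innerI ps (i + 1) else i
  else i
termination_by ps.length - i
decreasing_by omega

theorem innerI_ge (ps : List (List String)) (i : Nat) : i ≤ innerI ps i := by
  rw [innerI]
  split
  · split
    · have := innerI_ge ps (i + 1); omega
    · exact le_refl i
  · exact le_refl i
termination_by ps.length - i
decreasing_by omega

-- outer while loop of Source B: one group per delimiter line ('i == len' is written 'len ≤ i', the same test here
-- since i never exceeds len, making termination evident)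
def outerGroups (ps : List (List String)) (j : Nat) : List (List (List String)) :=
  let i := innerI ps j
  if ps.length ≤ i then []
  else PySem.List.slice ps (some (j : Int)) (some (i : Int)) :: outerGroups ps (i + 1)
termination_by ps.length - j
decreasing_by have := innerI_ge ps j; omega

def cleaning_alt (raw_lines : List String) : List String × List (List String) × List (List String) :=
  let parts := raw_lines.map (fun line => (PySem.Str.split? line "\t").getD [])
  let groups := outerGroups parts 0
  let all_words := groups.map (fun g => g.map (fun p => (PySem.List.pyGet? p 1).getD ""))
  let all_tags := groups.map (fun g => g.map (fun p => (PySem.List.pyGet? p 2).getD ""))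
  let all_texts := all_words.map (fun ws => ws.foldl (fun acc w => acc ++ (w ++ " ")) "")
  (all_texts, all_words, all_tags)

-- ===== PRECONDITION & SPEC =====
def Spec_cleaning (raw_lines : List String) (out : List String × List (List String) × List (List String)) : Prop := out = cleaning_alt raw_lines
instance (raw_lines : List String) (out : List String × List (List String) × List (List String)) : Decidable (Spec_cleaning raw_lines out) := by unfold Spec_cleaning; infer_instance

-- ===== CLAIM (what is proved, stated in full; the proofs are below) =====
def Claim_equal_cleaning : Prop := ∀ (raw_lines : List String), Dom_cleaning raw_lines → Spec_cleaning raw_lines (cleaning raw_lines)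

-- ===== LEMMAS AND PROOFS =====

-- length of the leading run of 3-field lines (proof-side characterisation of innerI)
def prefLen3 : List (List String) → Nat
  | [] => 0
  | p :: rest => if p.length == 3 then 1 + prefLen3 rest else 0

theorem prefLen3_le (ps : List (List String)) : prefLen3 ps ≤ ps.length := by
  induction ps with
  | nil => simp [prefLen3]
  | cons p rest ih => simp only [prefLen3, List.length_cons]; split <;> omega

-- recursive splitter: the groups outerGroups produces, phrased on the dropped suffix
def splitGroups (ps : List (List String)) : List (List (List String)) :=
  if h : prefLen3 ps = ps.length then []
  else ps.take (prefLen3 ps) :: splitGroups (ps.drop (prefLen3 ps + 1))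
termination_by ps.length
decreasing_by
  have := prefLen3_le ps
  simp only [List.length_drop]
  omega


def textOf (ws : List String) : String := ws.foldl (fun acc w => acc ++ (w ++ " ")) ""

def wordsOf (s : List (List String)) : List String := s.map (fun p => (PySem.List.pyGet? p 1).getD "")

def tagsOf (s : List (List String)) : List String := s.map (fun p => (PySem.List.pyGet? p 2).getD "")

-- A's loop, restructured with the three finished outputs factored out and the pending group as parameters
def bAux (w g : List String) : List (List String) → List String × List (List String) × List (List String)
  | [] => ([], [], [])
  | p :: rest =>
    match p with
    | [_, word, tag] => bAux (w ++ [word]) (g ++ [tag]) rest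
    | _ =>
      let r := bAux [] [] rest
      (textOf w :: r.1, w :: r.2.1, g :: r.2.2)

-- B's group list, consumed with a pending first group (w, g)
def pend (w g : List String) : List (List (List String)) → List String × List (List String) × List (List String)
  | [] => ([], [], [])
  | s :: ss => (textOf (w ++ wordsOf s) :: ss.map (fun s => textOf (wordsOf s)),
                (w ++ wordsOf s) :: ss.map wordsOf,
                (g ++ tagsOf s) :: ss.map tagsOf)

theorem textOf_concat (w : List String) (x : String) : textOf (w ++ [x]) = textOf w ++ x ++ " " := by
  simp [textOf, List.foldl_append, String.append_assoc]

theorem L1 (ps : List (List String)) :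
    ∀ (T : List String) (W G : List (List String)) (w g : List String),
      (let st := ps.foldl cleaningStepA (T, W, G, textOf w, w, g); ((st.1, st.2.1, st.2.2.1) : List String × List (List String) × List (List String)))
        = (T ++ (bAux w g ps).1, W ++ (bAux w g ps).2.1, G ++ (bAux w g ps).2.2) := by
  induction ps with
  | nil => intro T W G w g; simp [bAux]
  | cons p rest ih =>
    intro T W G w g
    match p with
    | [a, b, c] =>
      have h := ih T W G (w ++ [b]) (g ++ [c])
      simp only [List.foldl_cons, cleaningStepA, bAux]
      rw [← textOf_concat]
      exact h
    | [] =>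
      have h := ih (T ++ [textOf w]) (W ++ [w]) (G ++ [g]) [] []
      simp only [List.foldl_cons, cleaningStepA, bAux]
      simpa [textOf, List.append_assoc] using h
    | [a] =>
      have h := ih (T ++ [textOf w]) (W ++ [w]) (G ++ [g]) [] []
      simp only [List.foldl_cons, cleaningStepA, bAux]
      simpa [textOf, List.append_assoc] using h
    | [a, b] =>
      have h := ih (T ++ [textOf w]) (W ++ [w]) (G ++ [g]) [] []
      simp only [List.foldl_cons, cleaningStepA, bAux]
      simpa [textOf, List.append_assoc] using h
    | a :: b :: c :: d :: l =>
      have h := ih (T ++ [textOf w]) (W ++ [w]) (G ++ [g]) [] []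
      simp only [List.foldl_cons, cleaningStepA, bAux]
      simpa [textOf, List.append_assoc] using h

theorem splitGroups_eq (ps : List (List String)) :
    splitGroups ps = if prefLen3 ps = ps.length then []
      else ps.take (prefLen3 ps) :: splitGroups (ps.drop (prefLen3 ps + 1)) := by
  rw [splitGroups]; simp

theorem pend_nil_nil (gs : List (List (List String))) :
    pend [] [] gs = (gs.map (fun s => textOf (wordsOf s)), gs.map wordsOf, gs.map tagsOf) := by
  cases gs <;> simp [pend]

theorem wordsOf_cons3 (a b c : String) (s : List (List String)) :
    wordsOf ([a, b, c] :: s) = b :: wordsOf s := by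
  simp [wordsOf, PySem.List.pyGet?, PySem.List.pyIdx?]

theorem tagsOf_cons3 (a b c : String) (s : List (List String)) :
    tagsOf ([a, b, c] :: s) = c :: tagsOf s := by
  simp [tagsOf, PySem.List.pyGet?, PySem.List.pyIdx?]

theorem innerI_eq (ps : List (List String)) (j : Nat) :
    innerI ps j = j + prefLen3 (List.drop j ps) := by
  rw [innerI]
  split
  next h =>
    have hg : List.getD ps j [] = ps[j] := by
      simp [List.getD_eq_getElem?_getD, List.getElem?_eq_getElem h]
    by_cases h3 : ps[j].length = 3
    · rw [if_pos (by simp [List.getElem?_eq_getElem h, h3]), innerI_eq ps (j + 1), List.drop_eq_getElem_cons h]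
      simp only [prefLen3]
      rw [if_pos (by simp [h3])]
      omega
    · rw [if_neg (by simp [List.getElem?_eq_getElem h, h3]), List.drop_eq_getElem_cons h]
      simp only [prefLen3]
      rw [if_neg (by simp [h3])]
      omega
  next h =>
    rw [List.drop_eq_nil_of_le (by omega)]
    simp [prefLen3]
termination_by ps.length - j
decreasing_by omega

theorem outerGroups_eq (ps : List (List String)) (j : Nat) (hj : j ≤ ps.length) :
    outerGroups ps j = splitGroups (List.drop j ps) := by
  rw [outerGroups, splitGroups_eq, innerI_eq]
  have hk := prefLen3_le (List.drop j ps)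
  have hlen : (List.drop j ps).length = ps.length - j := List.length_drop
  by_cases hc : prefLen3 (List.drop j ps) = (List.drop j ps).length
  · rw [if_pos (by omega), if_pos hc]
  · rw [if_neg hc, if_neg (by omega),
      outerGroups_eq ps (j + prefLen3 (List.drop j ps) + 1) (by omega),
      PySem.List.slice_natCast]
    congr 1
    · congr 1
      omega
    · rw [List.drop_drop, ← Nat.add_assoc]
termination_by ps.length - j
decreasing_by omega

theorem L2 (ps : List (List String)) :
    ∀ (w g : List String), bAux w g ps = pend w g (splitGroups ps) := by
  induction ps with
  | nil => intro w g; rw [splitGroups_eq]; simp [bAux, prefLen3, pend]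
  | cons p rest ih =>
    intro w g
    match p with
    | [a, b, c] =>
      have h3 : prefLen3 ([a, b, c] :: rest) = 1 + prefLen3 rest := by simp [prefLen3]
      have hle := prefLen3_le rest
      simp only [bAux]
      rw [ih (w ++ [b]) (g ++ [c]), splitGroups_eq ([a, b, c] :: rest), h3]
      by_cases hr : prefLen3 rest = rest.length
      · rw [splitGroups_eq, if_pos hr, if_pos (by simp [hr]; omega)]
        simp [pend]
      · rw [splitGroups_eq, if_neg hr, if_neg (by simp; omega)]
        have hc : 1 + prefLen3 rest = prefLen3 rest + 1 := Nat.add_comm 1 _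
        rw [hc, List.take_succ_cons, List.drop_succ_cons]
        simp [pend, wordsOf_cons3, tagsOf_cons3]
    | [] =>
      simp only [bAux]
      rw [ih [] [], pend_nil_nil, splitGroups_eq (([]) :: rest)]
      simp [prefLen3, pend, wordsOf, tagsOf]
    | [a] =>
      simp only [bAux]
      rw [ih [] [], pend_nil_nil, splitGroups_eq (([a]) :: rest)]
      simp [prefLen3, pend, wordsOf, tagsOf]
    | [a, b] =>
      simp only [bAux]
      rw [ih [] [], pend_nil_nil, splitGroups_eq (([a, b]) :: rest)]
      simp [prefLen3, pend, wordsOf, tagsOf]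
    | a :: b :: c :: d :: l =>
      simp only [bAux]
      rw [ih [] [], pend_nil_nil, splitGroups_eq ((a :: b :: c :: d :: l) :: rest)]
      simp [prefLen3, pend, wordsOf, tagsOf]

-- ===== VERDICT (by name: the statement is the Claim_ definition above) =====
theorem cleaning_spec : Claim_equal_cleaning := by
  intro raw_lines _
  unfold Spec_cleaning cleaning cleaning_alt
  have h1 := L1 (raw_lines.map (fun line => (PySem.Str.split? line "\t").getD [])) [] [] [] [] []
  simp only [textOf, List.foldl_nil] at h1
  rw [h1, L2, pend_nil_nil]
  have h2 := outerGroups_eq (raw_lines.map (fun line => (PySem.Str.split? line "\t").getD [])) 0 (Nat.zero_le _)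
  rw [List.drop_zero] at h2
  simp only [h2]
  simp [textOf, wordsOf, tagsOf, List.map_map, Function.comp]
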